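-- pv_equiv track=rewrite | github.com/nenusudharshan/SudharshanReddy_Task_and_Assment_IN226079902_Innomatics | Task_6_Logic_Building_6/Logic_Building_Task_6.py | smart_parking
-- ===== SOURCE A (Python) =====
-- def smart_parking(capacity, logs):
--     current = 0
--     peak = 0
--
--     # Loop through vehicle logs
--     for entry in logs:
--         if entry == "IN":
--             current += 1
--         elif entry == "OUT":
--             current -= 1
--
--         # Track peak usage
--         if current > peak:
--             peak = current
--
--     # Parking status
--     if current > capacity:
--         status = "Over Capacity Alert"
--     else:
--         status = "Available"
--
--     return current, peak, status
-- ===== SOURCE B (Python) =====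
-- def smart_parking(capacity, logs):
--     deltas = [1 if e == "IN" else -1 if e == "OUT" else 0 for e in logs]
--     running = []
--     total = 0
--     for d in deltas:
--         total += d
--         running.append(total)
--     current = running[-1] if running else 0
--     peak = max([0] + running)
--     status = "Over Capacity Alert" if current > capacity else "Available"
--     return current, peak, status
-- ===== Notes on version B (the rewrite author's own statement) =====
-- stated objective: simpler
-- what changed: B maps logs to +1/-1/0 deltas, builds the list of running prefix sums, and derives current as the last running count and peak as max([0]+running), replacing A's single fold that interleaves delta logic with peak tracking.
import Mathlib
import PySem

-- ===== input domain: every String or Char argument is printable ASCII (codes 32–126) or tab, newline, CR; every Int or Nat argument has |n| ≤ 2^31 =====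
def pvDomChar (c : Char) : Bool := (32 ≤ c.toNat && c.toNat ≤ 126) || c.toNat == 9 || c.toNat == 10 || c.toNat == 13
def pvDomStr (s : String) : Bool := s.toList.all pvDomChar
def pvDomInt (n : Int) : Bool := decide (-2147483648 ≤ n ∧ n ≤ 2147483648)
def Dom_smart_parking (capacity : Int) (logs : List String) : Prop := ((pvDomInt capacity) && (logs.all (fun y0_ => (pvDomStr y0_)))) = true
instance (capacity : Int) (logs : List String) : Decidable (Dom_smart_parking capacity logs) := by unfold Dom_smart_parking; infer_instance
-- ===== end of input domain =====

-- B replaces A's interleaved fold by deltas → running prefix sums → last / max(0::·); objective: simpler decomposition.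


-- ===== PORT A =====
-- A's loop: current/peak updated entry by entry.
def pvALoop : Int → Int → List String → Int × Int
  | current, peak, [] => (current, peak)
  | current, peak, entry :: rest =>
    let current' := if entry = "IN" then current + 1 else if entry = "OUT" then current - 1 else current
    let peak' := if current' > peak then current' else peak
    pvALoop current' peak' rest

def smart_parking (capacity : Int) (logs : List String) : Int × Int × String :=
  let cp := pvALoop 0 0 logs
  let status := if cp.1 > capacity then "Over Capacity Alert" else "Available"
  (cp.1, cp.2, status)

-- ===== PORT B =====
-- running prefix sums of the deltas, as Source B's append loop builds them
def pvRunning : Int → List Int → List Int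
  | _, [] => []
  | total, d :: ds => (total + d) :: pvRunning (total + d) ds

def smart_parking_alt (capacity : Int) (logs : List String) : Int × Int × String :=
  let deltas := logs.map (fun e => if e = "IN" then (1 : Int) else if e = "OUT" then -1 else 0)
  let running := pvRunning 0 deltas
  let current := (running.getLast?).getD 0
  let peak := ((0 :: running).foldl max 0)   -- max([0] + running)
  let status := if current > capacity then "Over Capacity Alert" else "Available"
  (current, peak, status)

-- ===== PRECONDITION & SPEC =====
def Spec_smart_parking (capacity : Int) (logs : List String) (out : Int × Int × String) : Prop := out = smart_parking_alt capacity logs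
instance (capacity : Int) (logs : List String) (out : Int × Int × String) : Decidable (Spec_smart_parking capacity logs out) := by unfold Spec_smart_parking; infer_instance

-- ===== CLAIM (what is proved, stated in full; the proofs are below) =====
def Claim_equal_smart_parking : Prop := ∀ (capacity : Int) (logs : List String), Dom_smart_parking capacity logs → Spec_smart_parking capacity logs (smart_parking capacity logs)

-- ===== LEMMAS AND PROOFS =====
-- A's loop state equals (last running count, fold of max over the running counts).
theorem pvALoop_eq (logs : List String) : ∀ (c p : Int),
    pvALoop c p logs =
      ((pvRunning c (logs.map (fun e => if e = "IN" then (1 : Int) else if e = "OUT" then -1 else 0))).getLastD c,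
       (pvRunning c (logs.map (fun e => if e = "IN" then (1 : Int) else if e = "OUT" then -1 else 0))).foldl max p) := by
  induction logs with
  | nil => intro c p; rfl
  | cons e rest ih =>
    intro c p
    have hc : (if e = "IN" then c + 1 else if e = "OUT" then c - 1 else c)
        = c + (if e = "IN" then (1 : Int) else if e = "OUT" then -1 else 0) := by
      by_cases h1 : e = "IN" <;> by_cases h2 : e = "OUT" <;> simp [h1, h2] <;> ring
    have hp : ∀ c' p : Int, (if c' > p then c' else p) = max p c' := by
      intro c' p; split_ifs with h <;> omega
    simp only [pvALoop, List.map_cons, pvRunning, hc, hp, ih, List.getLastD_cons, List.foldl_cons]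

theorem smart_parking_spec : Claim_equal_smart_parking := by
  intro capacity logs _
  unfold Spec_smart_parking smart_parking smart_parking_alt
  rw [pvALoop_eq]
  simp [List.getLastD_eq_getLast?, List.foldl_cons]
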